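-- pv_equiv track=rewrite | github.com/anddonram/callsteering | classcall.py | simplify_classes
-- ===== SOURCE A (Python) =====
-- def simplify_classes(classes):
--     res=[]
--     res.extend(classes)
--
--     clas_dict={}
--
--     for clas in classes:
--         for clas2 in classes:
--             if clas2 in res:
--                 clas_dict[clas2]=clas2
--                 if clas!=clas2 and clas2.startswith(clas):
--                     res.remove(clas2)
--                     clas_dict[clas2]=clas
--
--     generic_to_class={}
--     for clas in clas_dict:
--         generic_to_class.setdefault(clas_dict[clas],[]).append(clas)
--
--     return res,clas_dict,generic_to_class
-- ===== SOURCE B (Python) =====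
-- def simplify_classes(classes):
--     # index of the first occurrence of each distinct class
--     index = {}
--     for i, c in enumerate(classes):
--         if c not in index:
--             index[c] = i
--     # for each distinct class, the prefix (a strictly shorter element of
--     # classes) occurring earliest in the list, else the class itself
--     clas_dict = {}
--     for c in classes:
--         if c not in clas_dict:
--             best = None
--             for j in range(len(c)):
--                 p = c[:j]
--                 if p in index and (best is None or index[p] < best[0]):
--                     best = (index[p], p)
--             clas_dict[c] = c if best is None else best[1]
--     res = [c for c in classes if clas_dict[c] == c]
--     generic_to_class = {}
--     for clas in clas_dict:
--         generic_to_class.setdefault(clas_dict[clas], []).append(clas)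
--     return res, clas_dict, generic_to_class
-- ===== Notes on version B (the rewrite author's own statement) =====
-- stated objective: faster
-- what changed: A's triple nested scan over class pairs with repeated list membership tests and in-place removals is replaced by a first-occurrence index dict plus, for each distinct class, a scan over its own prefixes picking the prefix with the smallest index; survivors and the grouping are then built in single passes.
import Mathlib
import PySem

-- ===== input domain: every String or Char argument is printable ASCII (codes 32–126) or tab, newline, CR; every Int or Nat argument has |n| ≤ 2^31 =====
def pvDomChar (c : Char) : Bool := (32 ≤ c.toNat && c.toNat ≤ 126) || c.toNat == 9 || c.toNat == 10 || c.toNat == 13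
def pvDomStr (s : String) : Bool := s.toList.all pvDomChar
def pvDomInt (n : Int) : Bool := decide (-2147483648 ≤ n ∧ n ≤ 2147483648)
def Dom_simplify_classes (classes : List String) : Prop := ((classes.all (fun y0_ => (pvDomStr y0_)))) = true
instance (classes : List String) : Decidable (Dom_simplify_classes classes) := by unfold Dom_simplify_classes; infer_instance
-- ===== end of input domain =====

-- B replaces A's cubic scan-and-remove pair loop by a first-occurrence index dict plus,
-- per distinct class, a scan of its own prefixes (objective: faster).

-- ===== PORT A =====
-- one inner-loop step: 'for clas2 in classes: if clas2 in res: clas_dict[clas2]=clas2; if clas!=clas2 and clas2.startswith(clas): res.remove(clas2); clas_dict[clas2]=clas'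
def aInner (clas : String) (st : List String × PySem.Dict String String) (clas2 : String) :
    List String × PySem.Dict String String :=
  if st.1.contains clas2 then
    let d := st.2.insert clas2 clas2
    if clas ≠ clas2 ∧ PySem.Str.startswith clas2 clas then
      -- res.remove(clas2): membership was just checked, so remove? is some; .getD is unreachable
      ((PySem.List.remove? st.1 clas2).getD st.1, d.insert clas2 clas)
    else (st.1, d)
  else st

def simplify_classes (classes : List String) :
    List String × (List (String × String)) × (List (String × List String)) :=
  -- res=[]; res.extend(classes); clas_dict={}
  let st := classes.foldl (fun st clas => classes.foldl (aInner clas) st)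
    (classes, PySem.Dict.empty)
  -- generic_to_class: for clas in clas_dict: setdefault(clas_dict[clas], []).append(clas)
  let g := st.2.keys.foldl (fun g clas =>
    let v := (st.2.get? clas).getD ""   -- clas_dict[clas]: key always present while iterating keys
    g.insert v ((g.getD v []) ++ [clas])) PySem.Dict.empty
  (st.1, st.2.items, g.items)

-- ===== PORT B =====
-- index = {}; for i, c in enumerate(classes): if c not in index: index[c] = i
def bIndex (classes : List String) : PySem.Dict String Int :=
  (PySem.List.enumerate classes 0).foldl
    (fun idx p => if idx.contains p.2 then idx else idx.insert p.2 p.1) PySem.Dict.empty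

-- best = None; for j in range(len(c)): p = c[:j]; if p in index and (best is None or index[p] < best[0]): best = (index[p], p)
def bBest (index : PySem.Dict String Int) (c : String) : Option (Int × String) :=
  (PySem.List.pyRange 0 (PySem.Str.len c) 1).foldl
    (fun best j =>
      let p := PySem.Str.slice c none (some j)
      if index.contains p then
        match best with
        | none => some ((index.get? p).getD 0, p)   -- index[p]: contains just checked
        | some b => if (index.get? p).getD 0 < b.1 then some ((index.get? p).getD 0, p) else best
      else best)
    none

def simplify_classes_alt (classes : List String) :
    List String × (List (String × String)) × (List (String × List String)) :=
  let index := bIndex classes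
  -- clas_dict = {}; for c in classes: if c not in clas_dict: ... clas_dict[c] = c if best is None else best[1]
  let clas_dict := classes.foldl (fun d c =>
    if d.contains c then d
    else d.insert c (match bBest index c with | none => c | some b => b.2)) PySem.Dict.empty
  -- res = [c for c in classes if clas_dict[c] == c]
  let res := classes.filter (fun c => ((clas_dict.get? c).getD "") == c)  -- key always present
  -- generic_to_class loop, same code as in A's Python
  let g := clas_dict.keys.foldl (fun g clas =>
    let v := (clas_dict.get? clas).getD ""
    g.insert v ((g.getD v []) ++ [clas])) PySem.Dict.empty
  (res, clas_dict.items, g.items)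

-- ===== PRECONDITION & SPEC =====
def Spec_simplify_classes (classes : List String) (out : List String × (List (String × String)) × (List (String × List String))) : Prop := out = simplify_classes_alt classes
instance (classes : List String) (out : List String × (List (String × String)) × (List (String × List String))) : Decidable (Spec_simplify_classes classes out) := by unfold Spec_simplify_classes; infer_instance

-- ===== CLAIM (what is proved, stated in full; the proofs are below) =====
def Claim_equal_simplify_classes : Prop := ∀ (classes : List String), Dom_simplify_classes classes → Spec_simplify_classes classes (simplify_classes classes)

-- ===== LEMMAS AND PROOFS =====

-- proper-prefix test: pvPP a x  =  'a != x and x.startswith(a)'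
def pvPP (a x : String) : Bool := (a != x) && PySem.Str.startswith x a

-- first element of P that is a proper prefix of x, else x
def pvVal (P : List String) (x : String) : String :=
  match P.find? (fun c => pvPP c x) with
  | some c => c
  | none => x

-- first-occurrence dedup (canonical key order of both dicts)
def pvDed (l : List String) : List String :=
  l.foldl (fun acc y => if y ∈ acc then acc else acc ++ [y]) []

-- survivors of the passes for outer elements P
def pvSurv (classes P : List String) : List String :=
  classes.filter (fun x => P.all (fun c => !pvPP c x))

-- the dict after the passes for outer elements P (P ≠ [])
def pvDFor (classes P : List String) : PySem.Dict String String :=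
  PySem.Dict.mk ((pvDed classes).map (fun y => (y, pvVal P y)))

-- dict effect of one inner pass step, with the pass-initial res r
def pvDStep (a : String) (r : List String) (d : PySem.Dict String String) (y : String) :
    PySem.Dict String String :=
  if r.contains y then
    (if a ≠ y ∧ PySem.Str.startswith y a then (d.insert y y).insert y a else d.insert y y)
  else d

lemma pvPP_iff (a y : String) : (a ≠ y ∧ PySem.Str.startswith y a) ↔ pvPP a y = true := by
  simp [pvPP]

lemma pvVal_eq_self_iff (P : List String) (y : String) :
    pvVal P y = y ↔ ∀ c ∈ P, ¬ pvPP c y = true := by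
  unfold pvVal
  cases h : P.find? (fun c => pvPP c y) with
  | none =>
    rw [List.find?_eq_none] at h
    simpa using h
  | some c =>
    have hc := List.find?_some h
    have hmem := List.mem_of_find?_eq_some h
    constructor
    · intro he
      have hcy : c = y := he
      rw [hcy] at hc
      simp [pvPP] at hc
    · intro hall; exact absurd hc (by simpa using hall c hmem)

lemma pvVal_singleton (a y : String) : pvVal [a] y = if pvPP a y then a else y := by
  unfold pvVal
  cases hpp : pvPP a y <;> simp [List.find?, hpp]

lemma pvVal_append_singleton (P : List String) (a y : String) :
    pvVal (P ++ [a]) y =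
      if pvVal P y = y then (if pvPP a y then a else y) else pvVal P y := by
  by_cases hself : pvVal P y = y
  · rw [if_pos hself]
    have hnone : P.find? (fun c => pvPP c y) = none := by
      rw [List.find?_eq_none]; exact (pvVal_eq_self_iff P y).mp hself
    unfold pvVal
    rw [List.find?_append, hnone]
    cases hpp : pvPP a y <;> simp [List.find?, hpp]
  · rw [if_neg hself]
    unfold pvVal at *
    cases h : P.find? (fun c => pvPP c y) with
    | none => rw [h] at hself; simp at hself
    | some c =>
      rw [List.find?_append, h]
      simp [Option.some_or]

-- ded facts
lemma pvDed_mem_aux (l : List String) : ∀ (acc : List String) (x : String),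
    (x ∈ l.foldl (fun acc y => if y ∈ acc then acc else acc ++ [y]) acc ↔ x ∈ acc ∨ x ∈ l) := by
  induction l with
  | nil => intro acc x; simp
  | cons y l ih =>
    intro acc x
    simp only [List.foldl_cons]
    by_cases hy : y ∈ acc
    · rw [if_pos hy, ih]
      constructor
      · rintro (h | h)
        · exact Or.inl h
        · exact Or.inr (List.mem_cons_of_mem y h)
      · rintro (h | h)
        · exact Or.inl h
        · rcases List.mem_cons.mp h with rfl | h
          · exact Or.inl hy
          · exact Or.inr h
    · rw [if_neg hy, ih]
      simp only [List.mem_append, List.mem_cons]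
      tauto

lemma mem_pvDed (l : List String) (x : String) : x ∈ pvDed l ↔ x ∈ l := by
  unfold pvDed
  rw [pvDed_mem_aux]
  simp

lemma pvDed_nodup_aux (l : List String) : ∀ (acc : List String), acc.Nodup →
    (l.foldl (fun acc y => if y ∈ acc then acc else acc ++ [y]) acc).Nodup := by
  induction l with
  | nil => intro acc h; simpa using h
  | cons y l ih =>
    intro acc h
    simp only [List.foldl_cons]
    by_cases hy : y ∈ acc
    · rw [if_pos hy]; exact ih acc h
    · rw [if_neg hy]
      exact ih (acc ++ [y]) (by
        simp [List.nodup_append, h]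
        intro a ha hay
        exact hy (hay ▸ ha))

lemma nodup_pvDed (l : List String) : (pvDed l).Nodup := by
  unfold pvDed
  exact pvDed_nodup_aux l [] (by simp)

lemma pvDed_append_singleton (l : List String) (y : String) :
    pvDed (l ++ [y]) = if y ∈ l then pvDed l else pvDed l ++ [y] := by
  unfold pvDed
  rw [List.foldl_append]
  simp only [List.foldl_cons, List.foldl_nil]
  have : y ∈ List.foldl (fun acc y => if y ∈ acc then acc else acc ++ [y]) [] l ↔ y ∈ l := mem_pvDed l y
  by_cases hy : y ∈ l
  · rw [if_pos (this.mpr hy), if_pos hy]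
  · rw [if_neg (fun h => hy (this.mp h)), if_neg hy]

-- dict helpers
lemma pv_get?_mk_map {ν : Type} (L : List String) (f : String → ν) (hnd : L.Nodup) (y : String) :
    (PySem.Dict.mk (L.map (fun z => (z, f z)))).get? y = if y ∈ L then some (f y) else none := by
  induction L with
  | nil => simp; rfl
  | cons z L ih =>
    simp only [List.map_cons]
    rw [PySem.Dict.get?_mk_cons]
    rcases List.nodup_cons.mp hnd with ⟨hz, hnd'⟩
    by_cases h : z = y
    · subst h
      simp
    · have : (z == y) = false := by simpa using h
      rw [this]
      simp only [Bool.false_eq_true, if_false]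
      rw [ih hnd']
      by_cases hy : y ∈ L
      · rw [if_pos hy, if_pos (by simp [hy])]
      · rw [if_neg hy, if_neg (by simp [hy, Ne.symm h])]

lemma pv_keys_mk_map {ν : Type} (L : List String) (f : String → ν) :
    (PySem.Dict.mk (L.map (fun z => (z, f z)))).keys = L := by
  simp only [PySem.Dict.keys, List.map_map]
  have h : ((fun (x : String × ν) => x.1) ∘ fun z => (z, f z)) = fun z => z := rfl
  rw [h, List.map_id']

lemma pv_insert_self_of_get? {ν : Type} (d : PySem.Dict String ν) (k : String) (v : ν)
    (h : d.get? k = some v) (hnd : d.keys.Nodup) : d.insert k v = d := by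
  apply PySem.Dict.ext
  rw [PySem.Dict.items_insert_of_contains _ _ (by rw [PySem.Dict.contains_eq_isSome_get?, h]; rfl)]
  conv_rhs => rw [← List.map_id d.items]
  apply List.map_congr_left
  intro p hp
  by_cases hk : p.1 = k
  · have hpk : (k, p.2) ∈ d.items := by rw [← hk]; exact hp
    have := PySem.Dict.get?_of_mem_items d hpk hnd
    rw [h] at this
    have hv : p.2 = v := by injection this.symm
    have hpv : p = (k, v) := by rw [← hk, ← hv]
    rw [hpv]
    simp
  · simp [hk]

-- a fold inserting a pure function of the key, from empty
lemma pv_foldl_insert_fn {ν : Type} (v : String → ν) : ∀ (l : List String),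
    l.foldl (fun d c => d.insert c (v c)) PySem.Dict.empty
      = PySem.Dict.mk ((pvDed l).map (fun c => (c, v c))) := by
  intro l
  induction l using List.reverseRecOn with
  | nil => rfl
  | append_singleton l y ih =>
    rw [List.foldl_append, ih]
    simp only [List.foldl_cons, List.foldl_nil]
    by_cases hy : y ∈ l
    · rw [pvDed_append_singleton, if_pos hy]
      exact pv_insert_self_of_get? _ y (v y)
        (by rw [pv_get?_mk_map _ _ (nodup_pvDed l), if_pos ((mem_pvDed l y).mpr hy)])
        (by rw [pv_keys_mk_map]; exact nodup_pvDed l)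
    · apply PySem.Dict.ext
      rw [PySem.Dict.items_insert_of_not_contains _ _
        (by rw [PySem.Dict.contains_eq_isSome_get?, pv_get?_mk_map _ _ (nodup_pvDed l),
          if_neg (fun h => hy ((mem_pvDed l y).mp h))]; rfl)]
      rw [pvDed_append_singleton, if_neg hy]
      simp

-- a fold inserting a pure function of the key only for new keys, from empty
lemma pv_foldl_insert_new {ν : Type} (v : String → ν) : ∀ (l : List String),
    l.foldl (fun d c => if d.contains c then d else d.insert c (v c)) PySem.Dict.empty
      = PySem.Dict.mk ((pvDed l).map (fun c => (c, v c))) := by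
  intro l
  induction l using List.reverseRecOn with
  | nil => rfl
  | append_singleton l y ih =>
    rw [List.foldl_append, ih]
    simp only [List.foldl_cons, List.foldl_nil]
    by_cases hy : y ∈ l
    · rw [if_pos (by rw [PySem.Dict.contains_eq_isSome_get?, pv_get?_mk_map _ _ (nodup_pvDed l),
        if_pos ((mem_pvDed l y).mpr hy)]; rfl)]
      rw [pvDed_append_singleton, if_pos hy]
    · rw [if_neg (by rw [PySem.Dict.contains_eq_isSome_get?, pv_get?_mk_map _ _ (nodup_pvDed l),
        if_neg (fun h => hy ((mem_pvDed l y).mp h))]; simp)]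
      apply PySem.Dict.ext
      rw [PySem.Dict.items_insert_of_not_contains _ _
        (by rw [PySem.Dict.contains_eq_isSome_get?, pv_get?_mk_map _ _ (nodup_pvDed l),
          if_neg (fun h => hy ((mem_pvDed l y).mp h))]; rfl)]
      rw [pvDed_append_singleton, if_neg hy]
      simp

-- ============ A side ============

lemma pv_filter_erase (p : String → Bool) (y : String) (hy : p y = false) (r : List String) :
    (r.erase y).filter p = r.filter p := by
  induction r with
  | nil => simp
  | cons a r ih =>
    by_cases ha : a = y
    · subst ha
      rw [List.erase_cons_head]
      simp [hy]
    · rw [List.erase_cons_tail (by simpa using ha)]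
      simp only [List.filter_cons]
      cases hpa : p a <;> simp [ih]

lemma pv_dStep_keys_nodup (a : String) (r : List String) (d : PySem.Dict String String)
    (y : String) (h : d.keys.Nodup) : (pvDStep a r d y).keys.Nodup := by
  unfold pvDStep
  split_ifs with h1 h2
  · exact PySem.Dict.nodup_keys_insert _ _ _ (PySem.Dict.nodup_keys_insert _ _ _ h)
  · exact PySem.Dict.nodup_keys_insert _ _ _ h
  · exact h

lemma pv_dStep_get?_ne (a : String) (r : List String) (d : PySem.Dict String String)
    (y z : String) (h : z ≠ y) : (pvDStep a r d y).get? z = d.get? z := by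
  unfold pvDStep
  split_ifs with h1 h2
  · rw [PySem.Dict.get?_insert_of_ne _ _ h, PySem.Dict.get?_insert_of_ne _ _ h]
  · rw [PySem.Dict.get?_insert_of_ne _ _ h]
  · rfl

-- folding pvDStep over R is insensitive to erasing one y from r once d maps y to a
lemma pv_foldl_dStep_erase (a y : String) (hy : pvPP a y = true) : ∀ (R r : List String)
    (d : PySem.Dict String String), y ∈ r → d.get? y = some a → d.keys.Nodup →
    R.foldl (fun d z => pvDStep a r d z) d = R.foldl (fun d z => pvDStep a (r.erase y) d z) d := by
  intro R
  induction R with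
  | nil => intros; rfl
  | cons z R' ih =>
    intro r d hyr hget hnd
    simp only [List.foldl_cons]
    by_cases hzy : z = y
    · subst hzy
      have hstep1 : pvDStep a r d z = d := by
        unfold pvDStep
        rw [if_pos (by rw [List.contains_eq_mem]; simpa using hyr)]
        rw [if_pos ((pvPP_iff a z).mpr hy)]
        rw [PySem.Dict.insert_insert_self]
        exact pv_insert_self_of_get? d z a hget hnd
      have hstep2 : pvDStep a (r.erase z) d z = d := by
        unfold pvDStep
        by_cases hz : z ∈ r.erase z
        · rw [if_pos (by rw [List.contains_eq_mem]; simpa using hz)]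
          rw [if_pos ((pvPP_iff a z).mpr hy)]
          rw [PySem.Dict.insert_insert_self]
          exact pv_insert_self_of_get? d z a hget hnd
        · rw [if_neg (by rw [List.contains_eq_mem]; simpa using hz)]
      rw [hstep1, hstep2]
      exact ih r d hyr hget hnd
    · have hcont : (r.erase y).contains z = r.contains z := by
        rw [List.contains_eq_mem, List.contains_eq_mem]
        simp [List.mem_erase_of_ne hzy]
      have hstep : pvDStep a (r.erase y) d z = pvDStep a r d z := by
        unfold pvDStep
        rw [hcont]
      rw [hstep]
      exact ih r (pvDStep a r d z) hyr
        (by rw [pv_dStep_get?_ne a r d z y (Ne.symm hzy)]; exact hget)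
        (pv_dStep_keys_nodup a r d z hnd)

-- one inner pass of A: res gets filtered, the dict evolves by pvDStep over the pass-initial res
lemma pv_innerPass (a : String) : ∀ (R r : List String) (d : PySem.Dict String String),
    d.keys.Nodup → (∀ x, pvPP a x = true → x ∈ r → r.count x ≤ R.count x) →
    R.foldl (aInner a) (r, d)
      = (r.filter (fun x => !pvPP a x), R.foldl (fun d z => pvDStep a r d z) d) := by
  intro R
  induction R with
  | nil =>
    intro r d _ hcount
    simp only [List.foldl_nil]
    rw [List.filter_eq_self.mpr]
    intro x hx
    by_contra hpx
    have hpp : pvPP a x = true := by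
      cases h : pvPP a x
      · rw [h] at hpx; simp at hpx
      · rfl
    have := hcount x hpp hx
    simp at this
    exact absurd ((List.count_pos_iff).mpr hx) (by omega)
  | cons y R' ih =>
    intro r d hnd hcount
    simp only [List.foldl_cons]
    by_cases hyr : y ∈ r
    · by_cases hpp : pvPP a y = true
      · have hstate : aInner a (r, d) y = (r.erase y, (d.insert y y).insert y a) := by
          unfold aInner
          rw [if_pos (by rw [List.contains_eq_mem]; simpa using hyr)]
          rw [if_pos ((pvPP_iff a y).mpr hpp)]
          rw [PySem.List.remove?_eq_some_erase r y hyr]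
          rfl
        have hdstep : pvDStep a r d y = (d.insert y y).insert y a := by
          unfold pvDStep
          rw [if_pos (by rw [List.contains_eq_mem]; simpa using hyr)]
          rw [if_pos ((pvPP_iff a y).mpr hpp)]
        rw [hstate, hdstep]
        rw [ih (r.erase y) ((d.insert y y).insert y a)
          (PySem.Dict.nodup_keys_insert _ _ _ (PySem.Dict.nodup_keys_insert _ _ _ hnd))
          (by
            intro x hx hxm
            have hxr : x ∈ r := (List.erase_sublist).mem hxm
            have := hcount x hx hxr
            by_cases hxy : x = y
            · subst hxy
              rw [List.count_erase_self]
              rw [List.count_cons_self] at this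
              omega
            · rw [List.count_erase_of_ne hxy]
              rw [List.count_cons] at this
              simp [Ne.symm hxy] at this
              exact this)]
        rw [pv_filter_erase _ y (by rw [hpp]; rfl) r]
        rw [← pv_foldl_dStep_erase a y hpp R' r ((d.insert y y).insert y a) hyr
          (PySem.Dict.get?_insert_self _ y a)
          (PySem.Dict.nodup_keys_insert _ _ _ (PySem.Dict.nodup_keys_insert _ _ _ hnd))]
      · have hppf : pvPP a y = false := by cases h : pvPP a y; rfl; exact absurd h hpp
        have hstate : aInner a (r, d) y = (r, d.insert y y) := by
          unfold aInner
          rw [if_pos (by rw [List.contains_eq_mem]; simpa using hyr)]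
          rw [if_neg (fun hc => hpp ((pvPP_iff a y).mp hc))]
        have hdstep : pvDStep a r d y = d.insert y y := by
          unfold pvDStep
          rw [if_pos (by rw [List.contains_eq_mem]; simpa using hyr)]
          rw [if_neg (fun hc => hpp ((pvPP_iff a y).mp hc))]
        rw [hstate, hdstep]
        exact ih r (d.insert y y) (PySem.Dict.nodup_keys_insert _ _ _ hnd)
          (by
            intro x hx hxr
            have := hcount x hx hxr
            have hxy : x ≠ y := fun he => by rw [he] at hx; rw [hx] at hppf; cases hppf
            rw [List.count_cons] at this
            simp [Ne.symm hxy] at this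
            exact this)
    · have hstate : aInner a (r, d) y = (r, d) := by
        unfold aInner
        rw [if_neg (by rw [List.contains_eq_mem]; simpa using hyr)]
      have hdstep : pvDStep a r d y = d := by
        unfold pvDStep
        rw [if_neg (by rw [List.contains_eq_mem]; simpa using hyr)]
      rw [hstate, hdstep]
      exact ih r d hnd (by
        intro x hx hxr
        have := hcount x hx hxr
        have hxy : x ≠ y := fun he => hyr (he ▸ hxr)
        rw [List.count_cons] at this
        simp [Ne.symm hxy] at this
        exact this)

lemma pv_dStep_eq_insert (a : String) (classes : List String) (d : PySem.Dict String String)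
    (y : String) (hy : y ∈ classes) :
    pvDStep a classes d y = d.insert y (pvVal [a] y) := by
  unfold pvDStep
  rw [if_pos (by rw [List.contains_eq_mem]; simpa using hy)]
  rw [pvVal_singleton]
  by_cases hpp : pvPP a y = true
  · rw [if_pos ((pvPP_iff a y).mpr hpp), hpp]
    simp only [if_true]
    exact PySem.Dict.insert_insert_self d y y a
  · have hppf : pvPP a y = false := by cases h : pvPP a y; rfl; exact absurd h hpp
    rw [if_neg (fun hc => hpp ((pvPP_iff a y).mp hc)), hppf]
    simp

lemma pv_passOne' (classes : List String) (a : String) :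
    classes.foldl (fun d z => pvDStep a classes d z) PySem.Dict.empty
      = pvDFor classes [a] := by
  rw [PySem.List.foldl_congr_mem classes _ (fun d c => d.insert c (pvVal [a] c)) _
    (fun acc x hx => pv_dStep_eq_insert a classes acc x hx)]
  exact pv_foldl_insert_fn (pvVal [a]) classes

-- a later pass (pass-initial res pvSurv classes P, dict pvDFor classes P)
lemma pv_passNext (classes P : List String) (a : String) : ∀ (l : List String),
    (∀ y ∈ l, y ∈ classes) →
    l.foldl (fun d z => pvDStep a (pvSurv classes P) d z) (pvDFor classes P)
      = PySem.Dict.mk ((pvDed classes).map (fun z =>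
          (z, if l.contains z && (pvVal P z == z) && pvPP a z then a else pvVal P z))) := by
  intro l
  induction l using List.reverseRecOn with
  | nil =>
    intro _
    unfold pvDFor
    simp only [List.foldl_nil]
    congr 1
  | append_singleton l y ih =>
    intro hmem
    have hy : y ∈ classes := hmem y (by simp)
    have hl : ∀ z ∈ l, z ∈ classes := fun z hz => hmem z (by simp [hz])
    rw [List.foldl_append, ih hl]
    simp only [List.foldl_cons, List.foldl_nil]
    have hyded : y ∈ pvDed classes := (mem_pvDed classes y).mpr hy
    have hget : ∀ z, (PySem.Dict.mk ((pvDed classes).map (fun z =>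
        (z, if l.contains z && (pvVal P z == z) && pvPP a z then a else pvVal P z)))).get? z
        = if z ∈ pvDed classes then
            some (if l.contains z && (pvVal P z == z) && pvPP a z then a else pvVal P z)
          else none :=
      pv_get?_mk_map (pvDed classes) _ (nodup_pvDed classes)
    have hcontD : (PySem.Dict.mk ((pvDed classes).map (fun z =>
        (z, if l.contains z && (pvVal P z == z) && pvPP a z then a else pvVal P z)))).contains y = true := by
      rw [PySem.Dict.contains_eq_isSome_get?, hget, if_pos hyded]; rfl
    have hnd : (PySem.Dict.mk ((pvDed classes).map (fun z =>
        (z, if l.contains z && (pvVal P z == z) && pvPP a z then a else pvVal P z)))).keys.Nodup := by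
      rw [pv_keys_mk_map]; exact nodup_pvDed classes
    have hwz : ∀ z, z ≠ y →
        (if (l ++ [y]).contains z && (pvVal P z == z) && pvPP a z then a else pvVal P z)
          = (if l.contains z && (pvVal P z == z) && pvPP a z then a else pvVal P z) := by
      intro z hzy
      have : (l ++ [y]).contains z = l.contains z := by
        rw [List.contains_eq_mem, List.contains_eq_mem]
        simp [List.mem_append, hzy]
      rw [this]
    by_cases hs : y ∈ pvSurv classes P
    · have hvaly : pvVal P y = y := by
        apply (pvVal_eq_self_iff P y).mpr
        intro c hc
        have := (List.mem_filter.mp hs).2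
        rw [List.all_eq_true] at this
        have := this c hc
        simp at this
        simp [this]
      have hcy : (l ++ [y]).contains y = true := by
        rw [List.contains_eq_mem]; simp
      by_cases hpp : pvPP a y = true
      · unfold pvDStep
        rw [if_pos (by rw [List.contains_eq_mem]; simpa using hs)]
        rw [if_pos ((pvPP_iff a y).mpr hpp)]
        rw [PySem.Dict.insert_insert_self]
        apply PySem.Dict.ext
        rw [PySem.Dict.items_insert_of_contains _ _ hcontD]
        show ((pvDed classes).map _).map _ = _
        rw [List.map_map]
        apply List.map_congr_left
        intro z hz
        by_cases hzy : z = y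
        · subst hzy
          simp only [Function.comp, BEq.rfl, if_true]
          rw [hcy, hvaly]
          simp [hpp]
        · have : (z == y) = false := by simpa using hzy
          simp only [Function.comp, this]
          rw [hwz z hzy]
          simp
      · have hppf : pvPP a y = false := by cases hq : pvPP a y; rfl; exact absurd hq hpp
        unfold pvDStep
        rw [if_pos (by rw [List.contains_eq_mem]; simpa using hs)]
        rw [if_neg (fun hc => hpp ((pvPP_iff a y).mp hc))]
        rw [pv_insert_self_of_get? _ y _ (by
            rw [hget, if_pos hyded]
            congr 1
            rw [hppf]
            simp [hvaly]) hnd]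
        congr 1
        apply List.map_congr_left
        intro z hz
        by_cases hzy : z = y
        · subst hzy
          simp [hppf]
        · rw [hwz z hzy]
    · unfold pvDStep
      rw [if_neg (by rw [List.contains_eq_mem]; simpa using hs)]
      have hvaly : pvVal P y ≠ y := by
        intro hv
        apply hs
        apply List.mem_filter.mpr
        refine ⟨hy, ?_⟩
        rw [List.all_eq_true]
        intro c hc
        have := (pvVal_eq_self_iff P y).mp hv c hc
        simpa using this
      congr 1
      apply List.map_congr_left
      intro z hz
      by_cases hzy : z = y
      · subst hzy
        have hbeq : (pvVal P z == z) = false := by simpa using hvaly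
        simp [hbeq]
      · rw [hwz z hzy]

lemma pv_passNext_full (classes P : List String) (a : String) :
    classes.foldl (fun d z => pvDStep a (pvSurv classes P) d z) (pvDFor classes P)
      = pvDFor classes (P ++ [a]) := by
  rw [pv_passNext classes P a classes (fun y hy => hy)]
  unfold pvDFor
  congr 1
  apply List.map_congr_left
  intro z hz
  have hzc : z ∈ classes := (mem_pvDed classes z).mp hz
  have hcont : classes.contains z = true := by rw [List.contains_eq_mem]; simpa using hzc
  rw [hcont, pvVal_append_singleton]
  by_cases hself : pvVal P z = z
  · have hbeq : (pvVal P z == z) = true := by simpa using hself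
    rw [if_pos hself]
    simp only [hbeq, Bool.true_and, Bool.and_true]
    cases hpp : pvPP a z <;> simp [hself]
  · have hbeq : (pvVal P z == z) = false := by simpa using hself
    rw [if_neg hself]
    simp [hbeq]

lemma pv_surv_filter (classes P : List String) (a : String) :
    (pvSurv classes P).filter (fun x => !pvPP a x) = pvSurv classes (P ++ [a]) := by
  unfold pvSurv
  rw [List.filter_filter]
  apply List.filter_congr
  intro x _
  simp only [List.all_append, List.all_cons, List.all_nil, Bool.and_true]
  cases P.all (fun c => !pvPP c x) <;> cases pvPP a x <;> simp

lemma pv_outerLoop (classes : List String) : ∀ (Q P : List String), P ≠ [] → P ++ Q = classes →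
    Q.foldl (fun st a => classes.foldl (aInner a) st) (pvSurv classes P, pvDFor classes P)
      = (pvSurv classes classes, pvDFor classes classes) := by
  intro Q
  induction Q with
  | nil =>
    intro P hP hPQ
    simp only [List.append_nil] at hPQ
    subst hPQ
    rfl
  | cons a Q' ih =>
    intro P hP hPQ
    simp only [List.foldl_cons]
    rw [pv_innerPass a classes (pvSurv classes P) (pvDFor classes P)
      (by unfold pvDFor; rw [pv_keys_mk_map]; exact nodup_pvDed classes)
      (fun x _ _ => List.Sublist.count_le x List.filter_sublist)]
    rw [pv_passNext_full, pv_surv_filter]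
    exact ih (P ++ [a]) (by simp) (by rw [List.append_assoc]; simpa using hPQ)

lemma pv_A_char (classes : List String) (h : classes ≠ []) :
    classes.foldl (fun st a => classes.foldl (aInner a) st) (classes, PySem.Dict.empty)
      = (pvSurv classes classes, pvDFor classes classes) := by
  cases classes with
  | nil => exact absurd rfl h
  | cons a rest =>
    have hstep : (a :: rest).foldl (fun st c => (a :: rest).foldl (aInner c) st) (a :: rest, PySem.Dict.empty)
        = rest.foldl (fun st c => (a :: rest).foldl (aInner c) st)
            ((a :: rest).foldl (aInner a) (a :: rest, PySem.Dict.empty)) := rfl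
    rw [hstep]
    rw [pv_innerPass a (a :: rest) (a :: rest) PySem.Dict.empty PySem.Dict.nodup_keys_empty
      (fun x _ _ => le_refl _)]
    rw [pv_passOne']
    have hres : (a :: rest).filter (fun x => !pvPP a x) = pvSurv (a :: rest) [a] := by
      unfold pvSurv
      apply List.filter_congr
      intro x _
      simp
    rw [hres]
    exact pv_outerLoop (a :: rest) rest [a] (by simp) (by simp)

-- ============ B side ============

-- prefixes of c as Python slices c[:j]
def pvPref (c : String) (j : Nat) : String := PySem.Str.slice c none (some (j : Int))

-- loop invariant of B's best-prefix scan after the first m slice lengths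
def pvInv (classes : List String) (c : String) (m : Nat) (b : Option (Int × String)) : Prop :=
  match b with
  | none => ∀ j, j < m → pvPref c j ∉ classes
  | some (i, p) => ∃ j, j < m ∧ p = pvPref c j ∧ p ∈ classes ∧ i = (classes.idxOf p : Int) ∧
      ∀ j', j' < m → pvPref c j' ∈ classes → pvPref c j' ≠ p →
        classes.idxOf p < classes.idxOf (pvPref c j')

lemma pvPref_toList (c : String) (j : Nat) : (pvPref c j).toList = c.toList.take j := by
  unfold pvPref
  rw [PySem.Str.toList_slice]
  simp [PySem.Chars.slice_eq_listSlice, PySem.List.slice_to_natCast]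

lemma pvPref_pp (c : String) (j : Nat) (hj : j < c.toList.length) : pvPP (pvPref c j) c = true := by
  have hlist := pvPref_toList c j
  have hne : pvPref c j ≠ c := by
    intro he
    have h1 := congrArg String.toList he
    rw [hlist] at h1
    have h2 := congrArg List.length h1
    rw [List.length_take] at h2
    omega
  have hsw : PySem.Chars.startswith c.toList (pvPref c j).toList = true := by
    rw [hlist]
    exact (PySem.Chars.startswith_iff _ _).mpr (List.take_prefix j c.toList)
  simp [pvPP, hne, hsw]

lemma pp_eq_pref (x c : String) (hx : pvPP x c = true) :
    x.toList.length < c.toList.length ∧ x = pvPref c x.toList.length := by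
  have hx' := hx
  simp [pvPP] at hx'
  obtain ⟨hne, hsw⟩ := hx'
  have hpre : x.toList <+: c.toList := (PySem.Chars.startswith_iff _ _).mp hsw
  have htake : x.toList = c.toList.take x.toList.length := List.prefix_iff_eq_take.mp hpre
  have hle : x.toList.length ≤ c.toList.length := hpre.length_le
  have hlt : x.toList.length < c.toList.length := by
    rcases Nat.lt_or_ge x.toList.length c.toList.length with h | h
    · exact h
    · exfalso
      have : x.toList = c.toList := by
        rw [htake, List.take_of_length_le (by omega)]
      exact hne (String.toList_inj.mp this)
  refine ⟨hlt, ?_⟩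
  apply String.toList_inj.mp
  rw [pvPref_toList, ← htake]

lemma pv_idxOf_inj (l : List String) (x y : String) (hx : x ∈ l) (hy : y ∈ l)
    (h : l.idxOf x = l.idxOf y) : x = y := by
  have h1 := List.getElem_idxOf (List.idxOf_lt_length_of_mem hx)
  have h2 := List.getElem_idxOf (List.idxOf_lt_length_of_mem hy)
  rw [← h1]
  conv_rhs => rw [← h2]
  congr 1

lemma pv_idxOf_append_le (as bs : List String) (w : String) :
    List.idxOf w (as ++ w :: bs) ≤ as.length := by
  rw [List.idxOf_append]
  by_cases h : w ∈ as
  · rw [if_pos h]; exact le_of_lt (List.idxOf_lt_length_of_mem h)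
  · rw [if_neg h, List.idxOf_cons_self]; simp

lemma pv_bIndex_char (classes : List String) :
    bIndex classes
      = PySem.Dict.mk ((pvDed classes).map (fun y => (y, (classes.idxOf y : Int)))) := by
  induction classes using List.reverseRecOn with
  | nil => rfl
  | append_singleton l y ih =>
    unfold bIndex at *
    rw [PySem.List.enumerate_append, List.foldl_append, ih]
    have hsing : PySem.List.enumerate [y] (0 + (l.length : Int)) = [((l.length : Int), y)] := by
      rw [PySem.List.enumerate_cons]
      simp [PySem.List.enumerate_nil]
    rw [hsing]
    simp only [List.foldl_cons, List.foldl_nil]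
    by_cases hy : y ∈ l
    · rw [if_pos (by
        rw [PySem.Dict.contains_eq_isSome_get?, pv_get?_mk_map _ _ (nodup_pvDed l),
          if_pos ((mem_pvDed l y).mpr hy)]; rfl)]
      rw [pvDed_append_singleton, if_pos hy]
      congr 1
      apply List.map_congr_left
      intro z hz
      have hzl : z ∈ l := (mem_pvDed l z).mp hz
      rw [List.idxOf_append, if_pos hzl]
    · rw [if_neg (by
        rw [PySem.Dict.contains_eq_isSome_get?, pv_get?_mk_map _ _ (nodup_pvDed l),
          if_neg (fun h => hy ((mem_pvDed l y).mp h))]; simp)]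
      apply PySem.Dict.ext
      rw [PySem.Dict.items_insert_of_not_contains _ _ (by
        rw [PySem.Dict.contains_eq_isSome_get?, pv_get?_mk_map _ _ (nodup_pvDed l),
          if_neg (fun h => hy ((mem_pvDed l y).mp h))]; rfl)]
      rw [pvDed_append_singleton, if_neg hy]
      show ((pvDed l).map _) ++ [(y, (l.length : Int))] = _
      rw [List.map_append]
      congr 1
      · apply List.map_congr_left
        intro z hz
        have hzl : z ∈ l := (mem_pvDed l z).mp hz
        rw [List.idxOf_append, if_pos hzl]
      · rw [List.map_singleton, List.idxOf_append, if_neg hy, List.idxOf_cons_self]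
        simp

lemma pv_index_get? (classes : List String) (p : String) :
    (bIndex classes).get? p = if p ∈ classes then some ((classes.idxOf p : Int)) else none := by
  rw [pv_bIndex_char, pv_get?_mk_map _ _ (nodup_pvDed classes)]
  by_cases h : p ∈ classes
  · rw [if_pos ((mem_pvDed _ _).mpr h), if_pos h]
  · rw [if_neg (fun hh => h ((mem_pvDed _ _).mp hh)), if_neg h]

lemma pv_index_contains (classes : List String) (p : String) :
    (bIndex classes).contains p = decide (p ∈ classes) := by
  rw [PySem.Dict.contains_eq_isSome_get?, pv_index_get?]
  by_cases h : p ∈ classes <;> simp [h]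

lemma pv_step_eq (classes : List String) (c : String) (m : Nat) (b : Option (Int × String)) :
    (let p := PySem.Str.slice c none (some ((m : Nat) : Int))
     if (bIndex classes).contains p then
       match b with
       | none => some (((bIndex classes).get? p).getD 0, p)
       | some bb => if ((bIndex classes).get? p).getD 0 < bb.1 then
           some (((bIndex classes).get? p).getD 0, p) else b
     else b)
    = if pvPref c m ∈ classes then
        (match b with
         | none => some ((classes.idxOf (pvPref c m) : Int), pvPref c m)
         | some bb => if (classes.idxOf (pvPref c m) : Int) < bb.1 then
             some ((classes.idxOf (pvPref c m) : Int), pvPref c m) else b)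
      else b := by
  by_cases hp : pvPref c m ∈ classes
  · have hp' : PySem.Str.slice c none (some ((m : Nat) : Int)) ∈ classes := hp
    cases b with
    | none => simp [pv_index_contains, pv_index_get?, hp', pvPref]
    | some bb => simp [pv_index_contains, pv_index_get?, hp', pvPref]
  · have hp' : PySem.Str.slice c none (some ((m : Nat) : Int)) ∉ classes := hp
    cases b with
    | none => simp [pv_index_contains, hp', pvPref]
    | some bb => simp [pv_index_contains, hp', pvPref]

lemma pv_inv_step (classes : List String) (c : String) (m : Nat) (hm : m < c.toList.length)
    (b : Option (Int × String)) : pvInv classes c m b → pvInv classes c (m + 1)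
      (if pvPref c m ∈ classes then
        (match b with
         | none => some ((classes.idxOf (pvPref c m) : Int), pvPref c m)
         | some bb => if (classes.idxOf (pvPref c m) : Int) < bb.1 then
             some ((classes.idxOf (pvPref c m) : Int), pvPref c m) else b)
      else b) := by
  intro hb
  by_cases hp : pvPref c m ∈ classes
  · rw [if_pos hp]
    cases b with
    | none =>
      refine ⟨m, by omega, rfl, hp, rfl, ?_⟩
      intro j' hj' hmem hne
      rcases Nat.lt_or_ge j' m with h | h
      · exact absurd hmem (hb j' h)
      · have hjm : j' = m := by omega
        rw [hjm] at hne
        exact absurd rfl hne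
    | some x =>
      obtain ⟨i, q⟩ := x
      obtain ⟨j0, hj0, hq, hqmem, hi, hmin⟩ := hb
      dsimp only
      by_cases hlt : (classes.idxOf (pvPref c m) : Int) < i
      · rw [if_pos hlt]
        refine ⟨m, by omega, rfl, hp, rfl, ?_⟩
        intro j' hj' hmem hne
        rcases Nat.lt_or_ge j' m with h | h
        · by_cases hq' : pvPref c j' = q
          · rw [hq']
            rw [hi] at hlt
            exact_mod_cast hlt
          · have h1 := hmin j' h hmem hq'
            have h2 : classes.idxOf (pvPref c m) < classes.idxOf q := by
              rw [hi] at hlt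
              exact_mod_cast hlt
            omega
        · have hjm : j' = m := by omega
          rw [hjm] at hne
          exact absurd rfl hne
      · rw [if_neg hlt]
        refine ⟨j0, by omega, hq, hqmem, hi, ?_⟩
        intro j' hj' hmem hne
        rcases Nat.lt_or_ge j' m with h | h
        · exact hmin j' h hmem hne
        · have hjm : j' = m := by omega
          subst hjm
          have hle : classes.idxOf q ≤ classes.idxOf (pvPref c j') := by
            rw [hi] at hlt
            omega
          rcases Nat.lt_or_ge (classes.idxOf q) (classes.idxOf (pvPref c j')) with h2 | h2
          · exact h2
          · exfalso
            have heq : classes.idxOf q = classes.idxOf (pvPref c j') := by omega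
            have hqp := pv_idxOf_inj classes q (pvPref c j') hqmem hmem heq
            rw [hq] at hne
            exact hne (by rw [← hqp, hq])
  · rw [if_neg hp]
    cases b with
    | none =>
      intro j' hj'
      rcases Nat.lt_or_ge j' m with h | h
      · exact hb j' h
      · have hjm : j' = m := by omega
        rw [hjm]
        exact hp
    | some x =>
      obtain ⟨i, q⟩ := x
      obtain ⟨j0, hj0, hq, hqmem, hi, hmin⟩ := hb
      refine ⟨j0, by omega, hq, hqmem, hi, ?_⟩
      intro j' hj' hmem hne
      rcases Nat.lt_or_ge j' m with h | h
      · exact hmin j' h hmem hne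
      · have hjm : j' = m := by omega
        rw [hjm] at hmem
        exact absurd hmem hp

lemma pv_fold_inv (classes : List String) (c : String) : ∀ (m : Nat), m ≤ c.toList.length →
    pvInv classes c m ((List.range m).foldl (fun x (y : Nat) =>
      let p := PySem.Str.slice c none (some ((y : Nat) : Int))
      if (bIndex classes).contains p then
        match x with
        | none => some (((bIndex classes).get? p).getD 0, p)
        | some b => if ((bIndex classes).get? p).getD 0 < b.1 then
            some (((bIndex classes).get? p).getD 0, p) else x
      else x) none) := by
  intro m
  induction m with
  | zero =>
    intro _ j hj
    omega
  | succ m ih =>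
    intro hm
    rw [List.range_succ, List.foldl_append]
    simp only [List.foldl_cons, List.foldl_nil]
    have h1 := pv_inv_step classes c m (by omega) _ (ih (by omega))
    rw [← pv_step_eq classes c m] at h1
    exact h1

lemma pv_inv_conclusion (classes : List String) (c : String) (b : Option (Int × String)) :
    pvInv classes c c.toList.length b →
    (match b with | none => c | some x => x.2) = pvVal classes c := by
  intro hinv
  cases b with
  | none =>
    unfold pvVal
    cases hf : classes.find? (fun x => pvPP x c) with
    | none => rfl
    | some w =>
      exfalso
      have hw := List.find?_some hf
      have hwmem := List.mem_of_find?_eq_some hf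
      obtain ⟨hlt, heq⟩ := pp_eq_pref w c hw
      exact (hinv w.toList.length hlt) (heq ▸ hwmem)
  | some x =>
    obtain ⟨i, p⟩ := x
    obtain ⟨j, hj, hp, hpmem, hi, hmin⟩ := hinv
    have hppc : pvPP p c = true := by
      rw [hp]
      exact pvPref_pp c j hj
    unfold pvVal
    cases hf : classes.find? (fun x => pvPP x c) with
    | none =>
      rw [List.find?_eq_none] at hf
      exact absurd hppc (by simpa using hf p hpmem)
    | some w =>
      show p = w
      rcases List.find?_eq_some_iff_append.mp hf with ⟨hpw, as, bs, hsplit, hall⟩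
      by_contra hne
      obtain ⟨hwlt, hweq⟩ := pp_eq_pref w c hpw
      have hwmem : w ∈ classes := by rw [hsplit]; simp
      have hlt2 : classes.idxOf p < classes.idxOf w := by
        have := hmin w.toList.length hwlt (by rw [← hweq]; exact hwmem)
          (by rw [← hweq]; exact fun hh => hne hh.symm)
        rw [← hweq] at this
        exact this
      have hple : classes.idxOf w ≤ as.length := by
        rw [hsplit]
        exact pv_idxOf_append_le as bs w
      have hplt2 : classes.idxOf p < as.length := lt_of_lt_of_le hlt2 hple
      have hgetp : classes[classes.idxOf p]'(List.idxOf_lt_length_of_mem hpmem) = p :=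
        List.getElem_idxOf _
      have hpin : p ∈ as := by
        have hplen : classes.idxOf p < classes.length := List.idxOf_lt_length_of_mem hpmem
        have : classes[classes.idxOf p]'hplen = as[classes.idxOf p]'hplt2 := by
          have hc : classes = as ++ w :: bs := hsplit
          subst hc
          exact List.getElem_append_left hplt2
        rw [hgetp] at this
        rw [this]
        exact List.getElem_mem _
      have := hall p hpin
      rw [hppc] at this
      simp at this

lemma pv_bBest_char (classes : List String) (c : String) :
    (match bBest (bIndex classes) c with | none => c | some b => b.2) = pvVal classes c := by
  unfold bBest
  rw [PySem.Str.len_eq, PySem.List.pyRange_zero_nat, List.foldl_map]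
  exact pv_inv_conclusion classes c _ (pv_fold_inv classes c c.toList.length (le_refl _))

lemma pv_B_dict_char (classes : List String) :
    classes.foldl (fun d c =>
        if d.contains c then d
        else d.insert c (match bBest (bIndex classes) c with | none => c | some b => b.2))
      PySem.Dict.empty = pvDFor classes classes := by
  refine Eq.trans (pv_foldl_insert_new
    (fun c => match bBest (bIndex classes) c with | none => c | some b => b.2) classes) ?_
  unfold pvDFor
  congr 1
  apply List.map_congr_left
  intro z _
  rw [pv_bBest_char]

lemma pv_res_eq (classes : List String) :
    classes.filter (fun c => (((pvDFor classes classes).get? c).getD "") == c)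
      = pvSurv classes classes := by
  unfold pvSurv
  apply List.filter_congr
  intro c hc
  have hget : (pvDFor classes classes).get? c = some (pvVal classes c) := by
    unfold pvDFor
    rw [pv_get?_mk_map _ _ (nodup_pvDed classes), if_pos ((mem_pvDed _ _).mpr hc)]
  rw [hget]
  show (pvVal classes c == c) = classes.all fun x => !pvPP x c
  by_cases hself : pvVal classes c = c
  · have h1 : (pvVal classes c == c) = true := by simpa using hself
    rw [h1]
    symm
    rw [List.all_eq_true]
    intro x hx
    have := (pvVal_eq_self_iff classes c).mp hself x hx
    simpa using this
  · have h1 : (pvVal classes c == c) = false := by simpa using hself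
    rw [h1]
    symm
    rw [← Bool.not_eq_true, List.all_eq_true]
    intro hall
    apply hself
    apply (pvVal_eq_self_iff classes c).mpr
    intro x hx
    have := hall x hx
    simpa using this

-- ===== VERDICT (by name: the statement is the Claim_ definition above) =====
theorem simplify_classes_spec : Claim_equal_simplify_classes := by
  intro classes _
  unfold Spec_simplify_classes
  rcases List.eq_nil_or_concat classes with h | _
  · subst h; decide
  · have hne : classes ≠ [] := by rintro rfl; simp_all
    show simplify_classes classes = simplify_classes_alt classes
    unfold simplify_classes simplify_classes_alt
    simp only [pv_A_char classes hne, pv_B_dict_char classes, pv_res_eq classes]
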